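-- pv_equiv track=rewrite | github.com/MinjaeJo1999/Algorithm | 이진탐색/카카오_징검다리 건너기.py | solution
-- ===== SOURCE A (Python) =====
-- def solution(stones, k):
--     answer = 0
--     left = 1
--     right = max(stones)
--
--     while left <= right:
--         count = 0
--         mid = (left + right) // 2
--         for s in stones:
--             if s - mid <= 0:
--                 count += 1
--             else:
--                 count = 0
--
--         if count == k:
--             break
--         if count < k:
--             left = mid + 1
--         else:
--             right = mid - 1
--             answer = mid
--     return answer+1
-- ===== SOURCE B (Python) =====
-- def solution(stones, k):
--     # Precompute suffix maxima (in reverse order), then each trailing-run-length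
--     # query is answered by binary search on this nondecreasing array.
--     suf = []
--     cur = None
--     for s in reversed(stones):
--         cur = s if cur is None else (s if s > cur else cur)
--         suf.append(cur)
--
--     def run_len(mid):
--         # number of trailing stones <= mid = number of suffix maxima <= mid
--         lo, hi = 0, len(suf)
--         while lo < hi:
--             m = (lo + hi) // 2
--             if suf[m] <= mid:
--                 lo = m + 1
--             else:
--                 hi = m
--         return lo
--
--     answer = 0
--     left = 1
--     right = suf[-1]  # max(stones)
--     while left <= right:
--         mid = (left + right) // 2
--         count = run_len(mid)
--         if count == k:
--             break
--         if count < k: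
--             left = mid + 1
--         else:
--             right = mid - 1
--             answer = mid
--     return answer + 1
-- ===== Notes on version B (the rewrite author's own statement) =====
-- stated objective: faster
-- what changed: precomputes the nondecreasing suffix-maxima array once and answers each binary-search probe's trailing-run-length by an inner binary search on it, instead of rescanning all stones per probe
import Mathlib
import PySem

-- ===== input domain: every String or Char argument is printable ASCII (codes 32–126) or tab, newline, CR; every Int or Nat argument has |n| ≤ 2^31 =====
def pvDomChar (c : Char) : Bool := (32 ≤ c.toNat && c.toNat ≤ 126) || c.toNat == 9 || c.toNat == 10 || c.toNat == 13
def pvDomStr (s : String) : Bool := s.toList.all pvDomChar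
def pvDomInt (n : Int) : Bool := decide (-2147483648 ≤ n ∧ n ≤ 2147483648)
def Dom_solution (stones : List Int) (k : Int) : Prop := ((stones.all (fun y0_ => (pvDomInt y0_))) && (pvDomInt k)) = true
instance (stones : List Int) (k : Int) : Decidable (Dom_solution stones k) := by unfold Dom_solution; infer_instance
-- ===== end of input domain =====

-- B replaces A's per-probe O(n) trailing-run scan by a precomputed suffix-maxima
-- array queried with an inner binary search (objective: faster).

-- ===== PORT A =====
-- the inner 'for s in stones' loop of A
def solAFold (mid count : Int) : List Int → Int
  | [] => count
  | s :: rest => solAFold mid (if s - mid ≤ 0 then count + 1 else 0) rest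

-- the 'while left <= right' loop of A ('break' and the final 'return answer+1' both return answer+1)
def solALoop (stones : List Int) (k left right answer : Int) : Int :=
  if h : left ≤ right then
    let mid := PySem.Int.floordiv (left + right) 2
    let count := solAFold mid 0 stones
    if count = k then answer + 1
    else if count < k then solALoop stones k (mid + 1) right answer
    else solALoop stones k left (mid - 1) mid
  else answer + 1
termination_by (right + 1 - left).toNat
decreasing_by
  · have := PySem.Int.floordiv_two_mid_bounds h
    omega
  · have := PySem.Int.floordiv_two_mid_bounds h
    omega

def solution (stones : List Int) (k : Int) : Int :=
  match PySem.List.max? stones (fun y => y) with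
  | some right => solALoop stones k 1 right 0
  | none => 0   -- Python raises ValueError on max([]): excluded by Pre_solution

-- ===== PORT B =====
-- the 'for s in reversed(stones)' loop building suf, after the first iteration fixed cur
def sufGo (cur : Int) : List Int → List Int
  | [] => []
  | s :: rest =>
      let c := if s > cur then s else cur   -- cur = s if s > cur else cur
      c :: sufGo c rest

-- suffix-maxima list of the (already reversed) input; [] stays [] (cur is still None)
def sufMaxes : List Int → List Int
  | [] => []
  | s :: rest => s :: sufGo s rest

-- run_len's 'while lo < hi' binary search; suf[m] is always in range (0 ≤ lo ≤ m < hi ≤ len), so getD is exact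
def bisectGo (suf : List Int) (mid : Int) (lo hi : Nat) : Nat :=
  if h : lo < hi then
    let m := (lo + hi) / 2
    if suf.getD m 0 ≤ mid then bisectGo suf mid (m + 1) hi
    else bisectGo suf mid lo m
  else lo
termination_by hi - lo
decreasing_by all_goals omega

-- the outer 'while left <= right' loop of B
def solBLoop (suf : List Int) (k left right answer : Int) : Int :=
  if h : left ≤ right then
    let mid := PySem.Int.floordiv (left + right) 2
    let count : Int := (bisectGo suf mid 0 suf.length : Nat)
    if count = k then answer + 1
    else if count < k then solBLoop suf k (mid + 1) right answer
    else solBLoop suf k left (mid - 1) mid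
  else answer + 1
termination_by (right + 1 - left).toNat
decreasing_by
  · have := PySem.Int.floordiv_two_mid_bounds h
    omega
  · have := PySem.Int.floordiv_two_mid_bounds h
    omega

def solution_alt (stones : List Int) (k : Int) : Int :=
  let suf := sufMaxes stones.reverse
  match suf.getLast? with
  | some right => solBLoop suf k 1 right 0
  | none => 0   -- suf[-1] raises IndexError on []: excluded by Pre_solution

-- ===== PRECONDITION & SPEC =====
-- Pre_ excludes only the empty list, on which A raises ValueError (max of empty sequence).
def Pre_solution (stones : List Int) (k : Int) : Prop := stones ≠ []
instance (stones : List Int) (k : Int) : Decidable (Pre_solution stones k) := by unfold Pre_solution; infer_instance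

def pvWitness_solution : List Int × Int := ([2, 4, 5, 3, 2, 1, 4, 2, 5, 1], 3)

def Spec_solution (stones : List Int) (k : Int) (out : Int) : Prop := out = solution_alt stones k
instance (stones : List Int) (k : Int) (out : Int) : Decidable (Spec_solution stones k out) := by unfold Spec_solution; infer_instance

-- ===== CLAIM (what is proved, stated in full; the proofs are below) =====
def Claim_equal_solution : Prop := ∀ (stones : List Int) (k : Int), Dom_solution stones k → Pre_solution stones k → Spec_solution stones k (solution stones k)

-- ===== LEMMAS AND PROOFS =====

-- takeWhile over an append
theorem pv_takeWhile_append (p : Int → Bool) (l1 l2 : List Int) :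
    (l1 ++ l2).takeWhile p = if l1.all p then l1 ++ l2.takeWhile p else l1.takeWhile p := by
  induction l1 with
  | nil => simp
  | cons x xs ih =>
      by_cases hx : p x <;> simp [List.takeWhile, hx, ih] <;> split_ifs <;> simp_all

-- a list all of whose elements satisfy p is its own takeWhile
theorem pv_takeWhile_all (p : Int → Bool) (l : List Int) (h : l.all p = true) : l.takeWhile p = l := by
  induction l with
  | nil => rfl
  | cons x xs ih => simp_all [List.takeWhile]

-- A's inner loop computes the length of the trailing run of stones ≤ mid
theorem solAFold_eq (mid : Int) : ∀ (l : List Int) (c : Int),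
    solAFold mid c l =
      if l.all (fun s => s ≤ mid) then c + l.length
      else ((l.reverse.takeWhile (fun s => s ≤ mid)).length : Int) := by
  intro l
  induction l with
  | nil => simp [solAFold]
  | cons s rest ih =>
      intro c
      have hsm : (s - mid ≤ 0) ↔ (s ≤ mid) := by omega
      by_cases hs : s ≤ mid
      · simp only [solAFold, if_pos (hsm.mpr hs), ih]
        by_cases hall : rest.all (fun s => s ≤ mid)
        · simp [hall, hs]; omega
        · simp only [hall, List.all_cons]
          simp [List.reverse_cons, pv_takeWhile_append, hall]
      · simp only [solAFold, if_neg (fun h => hs (hsm.mp h)), ih]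
        have hall : (s :: rest).all (fun s => decide (s ≤ mid)) = false := by simp [hs]
        simp only [hall, if_neg Bool.false_ne_true, List.reverse_cons, pv_takeWhile_append]
        by_cases hra : rest.all (fun s => s ≤ mid)
        · simp [hra, List.takeWhile, hs]
        · simp [hra]

-- cur ≤ mid → sufGo preserves the takeWhile length
theorem sufGo_takeWhile (mid : Int) : ∀ (l : List Int) (cur : Int), cur ≤ mid →
    ((sufGo cur l).takeWhile (fun s => s ≤ mid)).length = (l.takeWhile (fun s => s ≤ mid)).length := by
  intro l
  induction l with
  | nil => simp [sufGo]
  | cons s rest ih =>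
      intro cur hcur
      simp only [sufGo]
      by_cases hs : s ≤ mid
      · have hc : (if s > cur then s else cur) ≤ mid := by split <;> omega
        simp [List.takeWhile, hc, hs, ih _ hc]
      · have hc : ¬ (if s > cur then s else cur) ≤ mid := by split <;> omega
        simp [List.takeWhile, hc, hs]

theorem sufMaxes_takeWhile (mid : Int) (l : List Int) :
    ((sufMaxes l).takeWhile (fun s => s ≤ mid)).length = (l.takeWhile (fun s => s ≤ mid)).length := by
  cases l with
  | nil => simp [sufMaxes]
  | cons s rest =>
      by_cases hs : s ≤ mid
      · simp [sufMaxes, List.takeWhile, hs, sufGo_takeWhile mid rest s hs]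
      · simp [sufMaxes, List.takeWhile, hs]

-- every element of sufGo cur l is ≥ cur
theorem sufGo_mem_ge : ∀ (l : List Int) (cur x : Int), x ∈ sufGo cur l → cur ≤ x := by
  intro l
  induction l with
  | nil => simp [sufGo]
  | cons s rest ih =>
      intro cur x hx
      simp only [sufGo, List.mem_cons] at hx
      rcases hx with h | h
      · subst h; split <;> omega
      · have := ih _ x h
        split at this <;> omega

theorem sufGo_pairwise : ∀ (l : List Int) (cur : Int), (sufGo cur l).Pairwise (· ≤ ·) := by
  intro l
  induction l with
  | nil => simp [sufGo]
  | cons s rest ih =>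
      intro cur
      simp only [sufGo, List.pairwise_cons]
      exact ⟨fun x hx => sufGo_mem_ge rest _ x hx, ih _⟩

theorem sufMaxes_pairwise (l : List Int) : (sufMaxes l).Pairwise (· ≤ ·) := by
  cases l with
  | nil => simp [sufMaxes]
  | cons s rest =>
      simp only [sufMaxes, List.pairwise_cons]
      exact ⟨fun x hx => sufGo_mem_ge rest s x hx, sufGo_pairwise rest s⟩

-- the first element of l NOT satisfying p, if any, sits at index (takeWhile p l).length
theorem pv_takeWhile_getElem_false (p : Int → Bool) :
    ∀ (l : List Int) (h : (l.takeWhile p).length < l.length), p (l[(l.takeWhile p).length]) = false := by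
  intro l
  induction l with
  | nil => simp
  | cons x xs ih =>
      intro h
      by_cases hx : p x
      · simpa [List.takeWhile, hx] using ih (by simpa [List.takeWhile, hx] using h)
      · simpa [List.takeWhile, hx] using hx

-- B's binary search on a sorted list returns the takeWhile length
theorem bisectGo_eq (suf : List Int) (mid : Int) (hs : suf.Pairwise (· ≤ ·)) :
    ∀ (lo hi : Nat), lo ≤ (suf.takeWhile (fun s => s ≤ mid)).length →
      (suf.takeWhile (fun s => s ≤ mid)).length ≤ hi → hi ≤ suf.length →
      bisectGo suf mid lo hi = (suf.takeWhile (fun s => s ≤ mid)).length := by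
  have hpw := List.pairwise_iff_getElem.mp hs
  set p : Int → Bool := fun s => decide (s ≤ mid) with hp
  set T := (suf.takeWhile p).length with hT
  have hmemT : ∀ (i : Nat) (h : i < suf.length), i < T → suf[i] ≤ mid := by
    intro i h hi
    have hi' : i < (suf.takeWhile p).length := hi
    have h1 : (suf.takeWhile p)[i]'hi' = suf[i] := (List.takeWhile_prefix p).getElem hi'
    have h2 : (suf.takeWhile p)[i]'hi' ∈ suf.takeWhile p := List.getElem_mem _
    have h3 := List.mem_takeWhile_imp h2
    rw [h1] at h3
    simpa [hp] using h3
  have hTfalse : ∀ (h : T < suf.length), ¬ (suf[T] ≤ mid) := by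
    intro h
    have := pv_takeWhile_getElem_false p suf h
    simpa [hp] using this
  have main : ∀ (n lo hi : Nat), hi - lo = n → lo ≤ T → T ≤ hi → hi ≤ suf.length →
      bisectGo suf mid lo hi = T := by
    intro n
    induction n using Nat.strong_induction_on with
    | _ n ih =>
      intro lo hi hn h1 h2 h3
      rw [bisectGo]
      split
      · next hlt =>
        simp only
        have hm : lo ≤ (lo + hi) / 2 ∧ (lo + hi) / 2 < hi := by omega
        have hmlen : (lo + hi) / 2 < suf.length := by omega
        rw [List.getD_eq_getElem suf 0 hmlen]
        split
        · next hif =>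
          have hmT : (lo + hi) / 2 < T := by
            by_contra hc
            push_neg at hc
            have hTlt : T < suf.length := by omega
            have hf := hTfalse hTlt
            rcases Nat.lt_or_ge T ((lo + hi) / 2) with hlt' | hge
            · exact hf (le_trans (hpw T ((lo+hi)/2) hTlt hmlen hlt') hif)
            · have he : suf[T] = suf[(lo+hi)/2] := by congr 1; omega
              rw [he] at hf; exact hf hif
          exact ih (hi - ((lo+hi)/2 + 1)) (by omega) _ _ rfl (by omega) h2 h3
        · next hif =>
          have hTm : T ≤ (lo + hi) / 2 := by
            by_contra hc
            push_neg at hc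
            exact hif (hmemT _ hmlen hc)
          exact ih ((lo+hi)/2 - lo) (by omega) _ _ rfl h1 hTm (by omega)
      · next hge => omega
  intro lo hi h1 h2 h3
  exact main (hi - lo) lo hi rfl h1 h2 h3

-- the two count computations agree
theorem count_eq (stones : List Int) (mid : Int) :
    solAFold mid 0 stones = ((bisectGo (sufMaxes stones.reverse) mid 0 (sufMaxes stones.reverse).length : Nat) : Int) := by
  set suf := sufMaxes stones.reverse with hsuf
  have hTle : (suf.takeWhile (fun s => s ≤ mid)).length ≤ suf.length :=
    (List.takeWhile_prefix _).length_le
  rw [bisectGo_eq suf mid (by rw [hsuf]; exact sufMaxes_pairwise _) 0 suf.length (by omega) hTle (le_refl _)]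
  rw [hsuf, sufMaxes_takeWhile mid stones.reverse, solAFold_eq]
  by_cases hall : stones.all (fun s => s ≤ mid)
  · have hrall : stones.reverse.all (fun s => decide (s ≤ mid)) = true := by
      simpa using hall
    simp [hall, pv_takeWhile_all _ _ hrall]
  · simp [hall]

-- the two outer loops agree
theorem loop_eq (stones : List Int) (k : Int) : ∀ (left right answer : Int),
    solALoop stones k left right answer = solBLoop (sufMaxes stones.reverse) k left right answer := by
  have main : ∀ (n : Nat) (left right answer : Int), (right + 1 - left).toNat = n →
      solALoop stones k left right answer = solBLoop (sufMaxes stones.reverse) k left right answer := by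
    intro n
    induction n using Nat.strong_induction_on with
    | _ n ih =>
      intro left right answer hn
      rw [solALoop, solBLoop]
      split
      · next hle =>
        simp only
        rw [← count_eq stones (PySem.Int.floordiv (left + right) 2)]
        have hb := PySem.Int.floordiv_two_mid_bounds hle
        split
        · rfl
        · split
          · exact ih (right + 1 - (PySem.Int.floordiv (left + right) 2 + 1)).toNat (by omega) _ _ _ rfl
          · exact ih ((PySem.Int.floordiv (left + right) 2 - 1) + 1 - left).toNat (by omega) _ _ _ rfl
      · rfl
  intro left right answer
  exact main (right + 1 - left).toNat left right answer rfl

-- last element of the suffix-maxima list is the running max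
theorem sufGo_getLast : ∀ (l : List Int) (cur : Int),
    (cur :: sufGo cur l).getLast (by simp) = l.foldl max cur := by
  intro l
  induction l with
  | nil => simp [sufGo]
  | cons s rest ih =>
      intro cur
      simp only [sufGo, List.foldl_cons]
      have h1 : (cur :: (if s > cur then s else cur) :: sufGo (if s > cur then s else cur) rest).getLast (by simp)
          = ((if s > cur then s else cur) :: sufGo (if s > cur then s else cur) rest).getLast (by simp) := by
        simp [List.getLast_cons]
      rw [h1, ih]
      congr 1
      by_cases h : s > cur <;> simp [h, max_def] <;> omega

-- A's max(stones) equals B's suf[-1]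
theorem max?_eq_getLast (stones : List Int) (h : stones ≠ []) :
    PySem.List.max? stones (fun y => y) = (sufMaxes stones.reverse).getLast? := by
  cases hst : stones with
  | nil => exact absurd hst h
  | cons s rest =>
    cases hr : stones.reverse with
    | nil => exact absurd (List.reverse_eq_nil_iff.mp hr) h
    | cons s' t' =>
      rw [PySem.List.max?_id_cons]
      have hne : (s' :: sufGo s' t') ≠ [] := by simp
      rw [show (s :: rest) = stones from hst.symm, hr,
          show sufMaxes (s' :: t') = s' :: sufGo s' t' from rfl,
          List.getLast?_eq_some_getLast hne, sufGo_getLast]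
      have hmax1 := PySem.List.max?_id_cons (x := s) (t := rest)
      have hmax2 := PySem.List.max?_id_cons (x := s') (t := t')
      have h1mem : rest.foldl max s ∈ stones := by
        rw [hst]; exact PySem.List.max?_mem hmax1
      have h2mem : t'.foldl max s' ∈ stones := by
        rw [← List.mem_reverse, hr]; exact PySem.List.max?_mem hmax2
      have h1max : ∀ y ∈ stones, y ≤ rest.foldl max s := by
        rw [hst]; exact fun y hy => PySem.List.max?_isMax hmax1 y hy
      have h2max : ∀ y ∈ stones, y ≤ t'.foldl max s' := by
        intro y hy
        exact PySem.List.max?_isMax hmax2 y (by rwa [← hr, List.mem_reverse])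
      have := le_antisymm (h2max _ h1mem) (h1max _ h2mem)
      simp [this]

-- ===== VERDICT (by name: the statement is the Claim_ definition above) =====
theorem solution_spec : Claim_equal_solution := by
  intro stones k _ hpre
  unfold Spec_solution solution solution_alt
  rw [max?_eq_getLast stones hpre]
  cases hl : (sufMaxes stones.reverse).getLast? with
  | none => simp [hl]
  | some right => simp only [hl]; exact loop_eq stones k 1 right 0
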